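-- pv_equiv track=rewrite | github.com/jebreimo/Argen | Argen2/argument.py | find_metavar_separator
-- ===== SOURCE A (Python) =====
-- def find_metavar_separator(text):
--     candidates = {}
--     for i, ch in enumerate(text if not text.endswith("...") else text[:-3]):
--         if ch == "x" or not ch.isalnum():
--             if ch in candidates:
--                 candidates[ch].append(i)
--             else:
--                 candidates[ch] = [i]
--     for c in candidates:
--         if c == "x":
--             def check_text(s):
--                 return s.isalnum() and s.isupper()
--         else:
--             def check_text(s):
--                 return s.isalnum()
--         m = 0
--         for n in candidates[c]:
--             if m == n or not check_text(text[m:n]) or n == len(text) - 1: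
--                 break
--             m = n + 1
--         else:
--             return c
--     return None
-- ===== SOURCE B (Python) =====
-- def find_metavar_separator(text):
--     # Prefix-count lists turn each segment test into an arithmetic range check.
--     body = text[:-3] if text.endswith("...") else text
--     n = len(text)
--     alnum = [0]
--     upper = [0]
--     lower = [0]
--     for ch in text:
--         alnum.append(alnum[-1] + (1 if ch.isalnum() else 0))
--         upper.append(upper[-1] + (1 if ch.isupper() else 0))
--         lower.append(lower[-1] + (1 if ch.islower() else 0))
--     positions = {}
--     for i, ch in enumerate(body):
--         if ch == "x" or not ch.isalnum():
--             positions.setdefault(ch, []).append(i)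
--     for c, occ in positions.items():
--         valid = True
--         m = 0
--         for p in occ:
--             seg_ok = (p > m and alnum[p] - alnum[m] == p - m
--                       and (c != "x" or (upper[p] - upper[m] > 0
--                                         and lower[p] - lower[m] == 0)))
--             if not seg_ok or p == n - 1:
--                 valid = False
--                 break
--             m = p + 1
--         if valid:
--             return c
--     return None
-- ===== Notes on version B (the rewrite author's own statement) =====
-- stated objective: alternative
-- what changed: B precomputes three prefix-count lists (alnum/upper/lower) once and decides each segment's validity by an arithmetic range check, instead of A's slicing out text[m:n] and rescanning it for every candidate occurrence.
import Mathlib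
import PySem

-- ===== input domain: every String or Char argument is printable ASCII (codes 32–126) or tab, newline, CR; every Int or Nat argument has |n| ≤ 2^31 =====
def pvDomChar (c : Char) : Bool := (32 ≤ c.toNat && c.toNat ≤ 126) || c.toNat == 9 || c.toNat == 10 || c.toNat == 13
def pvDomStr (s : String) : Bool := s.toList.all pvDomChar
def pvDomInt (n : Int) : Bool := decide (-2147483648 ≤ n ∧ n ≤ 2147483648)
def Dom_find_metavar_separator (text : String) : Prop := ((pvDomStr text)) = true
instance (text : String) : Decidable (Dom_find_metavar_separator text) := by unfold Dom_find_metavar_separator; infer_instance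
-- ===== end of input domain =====

-- B: alternative algorithm — three precomputed prefix-count lists (alnum/upper/lower)
-- turn each segment validity test into an arithmetic range check, replacing A's
-- per-segment slicing and rescanning of text[m:n].
-- (str.isupper is hand-ported: exact on the ASCII domain, where cased = A–Z/a–z.)

-- ===== PORT A =====
-- s.isalnum() and s.isupper()  (hand port of isupper; exact on ASCII)
def pvAIsupperStr (s : List Char) : Bool :=
  s.any PySem.Chars.isupper && !(s.any PySem.Chars.islower)

-- check_text(text[m:n]) for candidate c
def pvACheck (cs : List Char) (c : Char) (m n : Int) : Bool :=
  let s := PySem.List.slice cs (some m) (some n)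
  if c == 'x' then PySem.Chars.strIsalnum s && pvAIsupperStr s
  else PySem.Chars.strIsalnum s

-- the inner 'for n in candidates[c]' loop; true = the loop ran to completion (for-else)
def pvAInner (cs : List Char) (c : Char) : List Int → Int → Bool
  | [], _ => true
  | n :: rest, m =>
    if m == n || !pvACheck cs c m n || n == (cs.length : Int) - 1 then false
    else pvAInner cs c rest (n + 1)

-- body of the first loop ('if ch in candidates: …append… else: …=[i]')
def pvAStep (d : PySem.Dict Char (List Int)) (p : Int × Char) : PySem.Dict Char (List Int) :=
  if p.2 == 'x' || !PySem.Chars.isalnum p.2 then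
    if d.contains p.2 then d.insert p.2 (d.getD p.2 [] ++ [p.1])
    else d.insert p.2 [p.1]
  else d

def pvACands (body : List Char) : PySem.Dict Char (List Int) :=
  (PySem.List.enumerate body 0).foldl pvAStep PySem.Dict.empty

def find_metavar_separator (text : String) : Option String :=
  let cs := text.toList
  let body := if PySem.Chars.endswith cs ['.', '.', '.'] then PySem.List.slice cs none (some (-3)) else cs
  (pvACands body).items.findSome? fun p =>
    if pvAInner cs p.1 p.2 0 then some (String.ofList [p.1]) else none

-- ===== PORT B =====
-- the prefix-building loop: state = (alnum, upper, lower); 'arr.append(arr[-1] + …)'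
def pvBPrefixes (cs : List Char) : List Int × List Int × List Int :=
  cs.foldl
    (fun st ch =>
      (st.1 ++ [PySem.List.pyGetD st.1 (-1) 0 + (if PySem.Chars.isalnum ch then 1 else 0)],
       st.2.1 ++ [PySem.List.pyGetD st.2.1 (-1) 0 + (if PySem.Chars.isupper ch then 1 else 0)],
       st.2.2 ++ [PySem.List.pyGetD st.2.2 (-1) 0 + (if PySem.Chars.islower ch then 1 else 0)]))
    ([0], [0], [0])

-- 'positions.setdefault(ch, []).append(i)'
def pvBStep (d : PySem.Dict Char (List Int)) (p : Int × Char) : PySem.Dict Char (List Int) :=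
  if p.2 == 'x' || !PySem.Chars.isalnum p.2 then
    d.insert p.2 (d.getD p.2 [] ++ [p.1])
  else d

def pvBPositions (body : List Char) : PySem.Dict Char (List Int) :=
  (PySem.List.enumerate body 0).foldl pvBStep PySem.Dict.empty

-- seg_ok; list indices are always in range in B, so pyGetD's default is never used
def pvBSegOk (aln up lo : List Int) (c : Char) (m p : Int) : Bool :=
  decide (m < p) && (PySem.List.pyGetD aln p 0 - PySem.List.pyGetD aln m 0 == p - m)
    && (c != 'x' || (decide (0 < PySem.List.pyGetD up p 0 - PySem.List.pyGetD up m 0)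
        && (PySem.List.pyGetD lo p 0 - PySem.List.pyGetD lo m 0 == 0)))

-- the inner 'for p in occ' loop; true = valid stayed True
def pvBInner (aln up lo : List Int) (L : Int) (c : Char) : List Int → Int → Bool
  | [], _ => true
  | p :: rest, m =>
    if !pvBSegOk aln up lo c m p || p == L - 1 then false
    else pvBInner aln up lo L c rest (p + 1)

def find_metavar_separator_alt (text : String) : Option String :=
  let cs := text.toList
  let body := if PySem.Chars.endswith cs ['.', '.', '.'] then PySem.List.slice cs none (some (-3)) else cs
  let pre := pvBPrefixes cs
  (pvBPositions body).items.findSome? fun p =>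
    if pvBInner pre.1 pre.2.1 pre.2.2 (cs.length : Int) p.1 p.2 0 then some (String.ofList [p.1]) else none

-- ===== PRECONDITION & SPEC =====
def Spec_find_metavar_separator (text : String) (out : Option String) : Prop := out = find_metavar_separator_alt text
instance (text : String) (out : Option String) : Decidable (Spec_find_metavar_separator text out) := by unfold Spec_find_metavar_separator; infer_instance

-- ===== CLAIM (what is proved, stated in full; the proofs are below) =====
def Claim_equal_find_metavar_separator : Prop := ∀ (text : String), Dom_find_metavar_separator text → Spec_find_metavar_separator text (find_metavar_separator text)

-- ===== LEMMAS AND PROOFS =====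

-- generic single prefix-count list
def pvPref (f : Char → Bool) (cs : List Char) : List Int :=
  cs.foldl (fun arr ch => arr ++ [PySem.List.pyGetD arr (-1) 0 + (if f ch then 1 else 0)]) [0]

theorem pv_triple (cs : List Char) (a b c : List Int) :
    cs.foldl
      (fun st ch =>
        (st.1 ++ [PySem.List.pyGetD st.1 (-1) 0 + (if PySem.Chars.isalnum ch then 1 else 0)],
         st.2.1 ++ [PySem.List.pyGetD st.2.1 (-1) 0 + (if PySem.Chars.isupper ch then 1 else 0)],
         st.2.2 ++ [PySem.List.pyGetD st.2.2 (-1) 0 + (if PySem.Chars.islower ch then 1 else 0)])) (a, b, c)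
      = (cs.foldl (fun arr ch => arr ++ [PySem.List.pyGetD arr (-1) 0 + (if PySem.Chars.isalnum ch then 1 else 0)]) a,
         cs.foldl (fun arr ch => arr ++ [PySem.List.pyGetD arr (-1) 0 + (if PySem.Chars.isupper ch then 1 else 0)]) b,
         cs.foldl (fun arr ch => arr ++ [PySem.List.pyGetD arr (-1) 0 + (if PySem.Chars.islower ch then 1 else 0)]) c) := by
  induction cs generalizing a b c with
  | nil => rfl
  | cons ch rest ih => simp only [List.foldl_cons]; exact ih _ _ _

theorem pvBPrefixes_eq (cs : List Char) :
    pvBPrefixes cs = (pvPref PySem.Chars.isalnum cs, pvPref PySem.Chars.isupper cs, pvPref PySem.Chars.islower cs) := by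
  unfold pvBPrefixes pvPref
  exact pv_triple cs [0] [0] [0]

theorem pvPref_eq (f : Char → Bool) (cs : List Char) :
    pvPref f cs = (List.range (cs.length + 1)).map (fun k => ((cs.take k).countP f : Int)) := by
  induction cs using List.reverseRecOn with
  | nil => rfl
  | append_singleton cs ch ih =>
    unfold pvPref at ih ⊢
    rw [List.foldl_append, List.foldl_cons, List.foldl_nil, ih]
    have hrs : List.range (cs.length + 1) = List.range cs.length ++ [cs.length] := by
      simpa using List.range_succ
    have hlast : (List.range (cs.length + 1)).map (fun k => (((cs.take k).countP f : Nat) : Int))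
        = (List.range cs.length).map (fun k => (((cs.take k).countP f : Nat) : Int))
          ++ [((cs.countP f : Nat) : Int)] := by
      rw [hrs, List.map_append]
      simp
    rw [hlast, PySem.List.pyGetD_neg_one_append_singleton, ← hlast]
    have hrs2 : List.range (cs.length + 1 + 1) = List.range (cs.length + 1) ++ [cs.length + 1] := by
      simpa using List.range_succ
    simp only [List.length_append, List.length_singleton, hrs2, List.map_append]
    congr 1
    · refine (List.map_congr_left fun k hk => ?_).symm
      rw [List.take_append_of_le_length (Nat.lt_succ_iff.mp (List.mem_range.mp hk))]
    · have hfull : (cs ++ [ch]).take (cs.length + 1) = cs ++ [ch] := by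
        apply List.take_of_length_le; simp
      rw [List.map_singleton, hfull, List.countP_append]
      simp [List.countP_cons]

theorem pvPref_getD (f : Char → Bool) (cs : List Char) (k : Nat) (hk : k ≤ cs.length) :
    PySem.List.pyGetD (pvPref f cs) (k : Int) 0 = ((cs.take k).countP f : Int) := by
  rw [pvPref_eq, PySem.List.pyGetD_natCast]
  rw [List.getD_eq_getElem?_getD, List.getElem?_map, List.getElem?_range (by omega)]
  rfl

theorem pvSteps_eq : pvAStep = pvBStep := by
  funext d p
  unfold pvAStep pvBStep
  by_cases hc : d.contains p.2 = true
  · simp [hc]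
  · simp [hc, PySem.Dict.getD_of_not_contains d [] (Bool.eq_false_iff.mpr hc)]

theorem pv_findSome?_congr {α β : Type} (l : List α) (f g : α → Option β)
    (h : ∀ x ∈ l, f x = g x) : l.findSome? f = l.findSome? g := by
  induction l with
  | nil => rfl
  | cons x xs ih =>
    simp only [List.findSome?_cons, h x (by simp)]
    cases g x with
    | some v => rfl
    | none => exact ih fun y hy => h y (by simp [hy])

theorem pv_cands_inv (B : Int) (ps : List (Int × Char)) (d : PySem.Dict Char (List Int))
    (hps : ∀ p ∈ ps, 0 ≤ p.1 ∧ p.1 < B)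
    (hd : ∀ kl ∈ d.items, ∀ x ∈ kl.2, 0 ≤ x ∧ x < B) :
    ∀ kl ∈ (ps.foldl pvBStep d).items, ∀ x ∈ kl.2, 0 ≤ x ∧ x < B := by
  induction ps generalizing d with
  | nil => exact hd
  | cons p rest ih =>
    simp only [List.foldl_cons]
    refine ih _ (fun q hq => hps q (by simp [hq])) ?_
    intro kl hkl x hx
    unfold pvBStep at hkl
    by_cases hcand : (p.2 == 'x' || !PySem.Chars.isalnum p.2) = true
    · rw [if_pos hcand] at hkl
      rcases (PySem.Dict.mem_items_insert d p.2 _ kl).1 hkl with h | h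
      · subst h
        rcases List.mem_append.1 hx with hx1 | hx1
        · rw [PySem.Dict.getD_eq_get?_getD] at hx1
          cases hg : d.get? p.2 with
          | none => rw [hg] at hx1; simp at hx1
          | some l =>
            rw [hg] at hx1
            exact hd (p.2, l) (PySem.Dict.mem_items_of_get?_eq_some d hg) x hx1
        · rw [List.mem_singleton.1 hx1]
          exact hps p (by simp)
      · exact hd kl h.1 x hx
    · rw [if_neg hcand] at hkl
      exact hd kl hkl x hx

theorem pv_cond_eq (cs : List Char) (c : Char) (m n : Int)
    (hm0 : 0 ≤ m) (hm1 : m ≤ (cs.length : Int)) (hn0 : 0 ≤ n) (hn1 : n ≤ (cs.length : Int)) :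
    (m == n || !pvACheck cs c m n)
      = !pvBSegOk (pvPref PySem.Chars.isalnum cs) (pvPref PySem.Chars.isupper cs)
          (pvPref PySem.Chars.islower cs) c m n := by
  by_cases hmn : m = n
  · subst hmn
    simp [pvBSegOk]
  · have hne : (m == n) = false := by simp [hmn]
    rcases lt_or_gt_of_ne hmn with hlt | hgt
    · -- m < n: the real case
      have hM : m = ((m.toNat : Nat) : Int) := (Int.toNat_of_nonneg hm0).symm
      have hN : n = ((n.toNat : Nat) : Int) := (Int.toNat_of_nonneg hn0).symm
      have hMN : m.toNat < n.toNat := by omega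
      have hNlen : n.toNat ≤ cs.length := by omega
      have hslice : PySem.List.slice cs (some m) (some n)
          = (cs.drop m.toNat).take (n.toNat - m.toNat) := PySem.List.slice_toNat cs hm0 hn0
      have hlen : ((cs.drop m.toNat).take (n.toNat - m.toNat)).length = n.toNat - m.toNat := by
        simp; omega
      have hget : ∀ f : Char → Bool,
          PySem.List.pyGetD (pvPref f cs) n 0 - PySem.List.pyGetD (pvPref f cs) m 0
            = (((cs.drop m.toNat).take (n.toNat - m.toNat)).countP f : Int) := by
        intro f
        conv_lhs => rw [hM, hN]
        rw [pvPref_getD f cs m.toNat (by omega), pvPref_getD f cs n.toNat hNlen]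
        have hsplit : (cs.take n.toNat).countP f
            = (cs.take m.toNat).countP f + ((cs.drop m.toNat).take (n.toNat - m.toNat)).countP f := by
          conv_lhs => rw [show n.toNat = m.toNat + (n.toNat - m.toNat) by omega, List.take_add,
            List.countP_append]
        rw [hsplit]; push_cast; ring
      set seg := (cs.drop m.toNat).take (n.toNat - m.toNat) with hsegdef
      have hnm : n - m = (seg.length : Int) := by rw [hlen]; omega
      have hlt' : decide (m < n) = true := by simp [hlt]
      have hemp : seg.isEmpty = false := by
        rw [List.isEmpty_eq_false_iff, ← List.length_pos_iff, hlen]; omega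
      have hA : PySem.Chars.strIsalnum seg = (((seg.countP PySem.Chars.isalnum : Nat) : Int) == n - m) := by
        rw [Bool.eq_iff_iff, hnm]
        simp only [PySem.Chars.strIsalnum, hemp, Bool.not_false, Bool.true_and, beq_iff_eq,
          Nat.cast_inj, List.all_eq_true]
        exact ⟨fun h => List.countP_eq_length.2 (by simpa using h),
               fun h => by simpa using List.countP_eq_length.1 h⟩
      have hU : pvAIsupperStr seg
          = (decide (0 < ((seg.countP PySem.Chars.isupper : Nat) : Int))
             && (((seg.countP PySem.Chars.islower : Nat) : Int) == 0)) := by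
        rw [Bool.eq_iff_iff]
        simp only [pvAIsupperStr, Bool.and_eq_true, Bool.not_eq_true', List.any_eq_true,
          List.any_eq_false, decide_eq_true_eq, beq_iff_eq]
        constructor
        · rintro ⟨⟨a, ha, hu⟩, hl⟩
          refine ⟨by exact_mod_cast List.countP_pos_iff.2 ⟨a, ha, hu⟩, ?_⟩
          exact_mod_cast List.countP_eq_zero.2 fun b hb => by simpa using hl b hb
        · rintro ⟨h1, h2⟩
          refine ⟨List.countP_pos_iff.1 (by exact_mod_cast h1), ?_⟩
          intro b hb
          have := List.countP_eq_zero.1 (by exact_mod_cast h2) b hb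
          simpa using this
      simp only [pvACheck, pvBSegOk, hslice, hget, hne, Bool.false_or, hA, hU, hlt',
        Bool.true_and]
      by_cases hx : (c == 'x') = true
      · have hx' : (c != 'x') = false := by rw [bne]; simp [hx]
        rw [if_pos hx, hx', Bool.false_or]
      · have hxf : (c == 'x') = false := Bool.eq_false_iff.mpr hx
        have hx' : (c != 'x') = true := by rw [bne]; simp [hxf]
        rw [if_neg hx, hx', Bool.true_or, Bool.and_true]
    · -- n < m: A's slice is empty, both sides break
      have hslice : PySem.List.slice cs (some m) (some n) = [] := by
        rw [PySem.List.slice_toNat cs hm0 hn0]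
        have h0 : n.toNat - m.toNat = 0 := by omega
        simp [h0]
      have hlt' : decide (m < n) = false := by simp; omega
      simp [pvACheck, pvBSegOk, hslice, PySem.Chars.strIsalnum, hne, hlt']

theorem pv_inner_eq (cs : List Char) (c : Char) (ns : List Int) (m : Int)
    (hns : ∀ x ∈ ns, 0 ≤ x ∧ x < (cs.length : Int))
    (hm0 : 0 ≤ m) (hm1 : m ≤ (cs.length : Int)) :
    pvAInner cs c ns m
      = pvBInner (pvPref PySem.Chars.isalnum cs) (pvPref PySem.Chars.isupper cs)
          (pvPref PySem.Chars.islower cs) ((cs.length : Int)) c ns m := by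
  induction ns generalizing m with
  | nil => rfl
  | cons n rest ih =>
    have hn := hns n (by simp)
    have hrest : ∀ x ∈ rest, 0 ≤ x ∧ x < (cs.length : Int) := fun x hx => hns x (by simp [hx])
    simp only [pvAInner, pvBInner]
    rw [← pv_cond_eq cs c m n hm0 hm1 hn.1 (le_of_lt hn.2)]
    by_cases h : ((m == n || !pvACheck cs c m n) || n == (cs.length : Int) - 1) = true
    · rw [if_pos h, if_pos h]
    · rw [if_neg h, if_neg h]
      exact ih (n + 1) hrest (by omega) (by omega)

-- ===== VERDICT (by name: the statement is the Claim_ definition above) =====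
theorem pv_main (text : String) :
    find_metavar_separator text = find_metavar_separator_alt text := by
  unfold find_metavar_separator find_metavar_separator_alt
  dsimp only
  set cs := text.toList with hcs
  set body := if PySem.Chars.endswith cs ['.', '.', '.'] then PySem.List.slice cs none (some (-3)) else cs with hbody
  have hblen : body.length ≤ cs.length := by
    rw [hbody]; split
    · rw [PySem.List.slice_to_neg_ofNat cs 3 (by omega)]
      simp
    · exact le_refl _
  rw [pvBPrefixes_eq]
  unfold pvACands pvBPositions
  rw [pvSteps_eq]
  apply pv_findSome?_congr
  intro p hp
  have henum : ∀ q ∈ PySem.List.enumerate body 0, 0 ≤ q.1 ∧ q.1 < (body.length : Int) := by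
    intro q hq
    obtain ⟨k, hk, rfl⟩ := (PySem.List.mem_enumerate_iff body 0 q).1 hq
    constructor <;> simp <;> omega
  have hempty : ∀ kl ∈ (PySem.Dict.empty : PySem.Dict Char (List Int)).items,
      ∀ x ∈ kl.2, 0 ≤ x ∧ x < (body.length : Int) := by
    intro kl hkl; cases hkl
  have hvals := pv_cands_inv (body.length) (PySem.List.enumerate body 0) PySem.Dict.empty
    henum hempty p hp
  rw [pv_inner_eq cs p.1 p.2 0
    (fun x hx => ⟨(hvals x hx).1, lt_of_lt_of_le (hvals x hx).2 (by exact_mod_cast hblen)⟩)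
    (le_refl 0) (by exact_mod_cast Nat.zero_le _)]

theorem find_metavar_separator_spec : Claim_equal_find_metavar_separator := by
  intro text _
  unfold Spec_find_metavar_separator
  exact pv_main text
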